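-- pv_equiv track=rewrite | github.com/ChuanyuXue/tsnkit | tsnkit/algorithms/ls.py | match_time
-- ===== SOURCE A (Python) =====
-- def match_time(t, sche) -> int:
--     """Find the index of entry that starts just before t
--
--     Args:
--         t (_type_): _description_
--         sche (_type_): [start, end, queue]
--
--     Returns:
--         int: _description_
--     """
--     if not sche:
--         return -1
--     gate_time = [x[0] for x in sche]
--     left = 0
--     right = len(gate_time) - 1
--
--     if gate_time[right] <= t < sche[-1][1]:
--         return right
--     elif sche[-1][1] <= t:
--         return -2
--     elif t < gate_time[0]:
--         return -1
--
--     while True: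
--         median = (left + right) // 2
--         if right - left <= 1:
--             return left
--         elif gate_time[left] <= t < gate_time[median]:
--             right = median
--         else:
--             left = median
-- ===== SOURCE B (Python) =====
-- def match_time(t, sche) -> int:
--     """Find the index of entry that starts just before t (recursive binary search)."""
--     if not sche:
--         return -1
--     last = sche[-1]
--     if last[0] <= t < last[1]:
--         return len(sche) - 1
--     if last[1] <= t:
--         return -2
--     if t < sche[0][0]:
--         return -1
--
--     def go(left, right):
--         if right - left <= 1:
--             return left
--         median = (left + right) // 2
--         if sche[left][0] <= t < sche[median][0]:
--             return go(left, median)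
--         return go(median, right)
--
--     return go(0, len(sche) - 1)
-- ===== Notes on version B (the rewrite author's own statement) =====
-- stated objective: alternative
-- what changed: The while-True loop over (left, right) with a precomputed gate_time list is replaced by a divide-and-conquer recursive helper go(left, right) that indexes sche directly, with the base case tested before computing the median.
import Mathlib
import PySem

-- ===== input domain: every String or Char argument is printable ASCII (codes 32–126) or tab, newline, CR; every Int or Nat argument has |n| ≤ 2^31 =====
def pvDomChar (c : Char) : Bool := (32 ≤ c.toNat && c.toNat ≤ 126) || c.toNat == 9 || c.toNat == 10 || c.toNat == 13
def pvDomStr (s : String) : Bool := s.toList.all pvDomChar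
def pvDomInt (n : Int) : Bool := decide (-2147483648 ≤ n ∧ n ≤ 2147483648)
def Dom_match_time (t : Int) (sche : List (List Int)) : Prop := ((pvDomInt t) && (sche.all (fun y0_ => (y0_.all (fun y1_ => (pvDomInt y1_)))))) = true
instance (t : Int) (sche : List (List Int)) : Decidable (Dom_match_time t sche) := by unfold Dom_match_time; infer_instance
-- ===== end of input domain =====

-- B replaces A's while-True loop (over a precomputed gate_time list) by a recursive
-- divide-and-conquer helper indexing sche directly; return values proved equal on Pre_.

-- ===== PORT A =====
-- the 'while True' loop of A over the state (left, right)
def mtLoopA (t : Int) (gate : List Int) (left right : Int) : Int :=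
  let median := PySem.Int.floordiv (left + right) 2
  if right - left ≤ 1 then left
  else if PySem.List.pyGetD gate left 0 ≤ t ∧ t < PySem.List.pyGetD gate median 0 then
    mtLoopA t gate left median
  else
    mtLoopA t gate median right
termination_by (right - left).toNat
decreasing_by
  all_goals
    simp only [PySem.Int.floordiv_eq_ediv_of_pos (by omega : (0:Int) < 2)] at *
    omega

def match_time (t : Int) (sche : List (List Int)) : Int :=
  if sche = [] then -1
  else
    let gate := sche.map (fun x => PySem.List.pyGetD x 0 0)
    let left : Int := 0
    let right : Int := (gate.length : Int) - 1
    let lastEnd := PySem.List.pyGetD (PySem.List.pyGetD sche (-1) []) 1 0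
    if PySem.List.pyGetD gate right 0 ≤ t ∧ t < lastEnd then right
    else if lastEnd ≤ t then -2
    else if t < PySem.List.pyGetD gate 0 0 then -1
    else mtLoopA t gate left right

-- ===== PORT B =====
-- B's recursive helper go(left, right)
def mtGo (t : Int) (sche : List (List Int)) (left right : Int) : Int :=
  if right - left ≤ 1 then left
  else
    let median := PySem.Int.floordiv (left + right) 2
    if PySem.List.pyGetD (PySem.List.pyGetD sche left []) 0 0 ≤ t ∧
        t < PySem.List.pyGetD (PySem.List.pyGetD sche median []) 0 0 then
      mtGo t sche left median
    else
      mtGo t sche median right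
termination_by (right - left).toNat
decreasing_by
  all_goals
    simp only [PySem.Int.floordiv_eq_ediv_of_pos (by omega : (0:Int) < 2)] at *
    omega

def match_time_alt (t : Int) (sche : List (List Int)) : Int :=
  if sche = [] then -1
  else
    let last := PySem.List.pyGetD sche (-1) []
    if PySem.List.pyGetD last 0 0 ≤ t ∧ t < PySem.List.pyGetD last 1 0 then (sche.length : Int) - 1
    else if PySem.List.pyGetD last 1 0 ≤ t then -2
    else if t < PySem.List.pyGetD (PySem.List.pyGetD sche 0 []) 0 0 then -1
    else mtGo t sche 0 ((sche.length : Int) - 1)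

-- ===== PRECONDITION & SPEC =====
-- Pre_ excludes exactly the inputs where Python A raises IndexError: a nonempty sche
-- containing an empty row (the gate_time comprehension raises) or whose last row has
-- fewer than two elements (sche[-1][1] raises).
def Pre_match_time (t : Int) (sche : List (List Int)) : Prop :=
  sche = [] ∨ ((∀ r ∈ sche, r ≠ []) ∧ 2 ≤ (sche.getLast?.getD []).length)
instance (t : Int) (sche : List (List Int)) : Decidable (Pre_match_time t sche) := by
  unfold Pre_match_time; infer_instance

def pvWitness_match_time : Int × List (List Int) := (5, [[1, 4, 0], [4, 8, 1], [9, 12, 0]])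

def Spec_match_time (t : Int) (sche : List (List Int)) (out : Int) : Prop := out = match_time_alt t sche
instance (t : Int) (sche : List (List Int)) (out : Int) : Decidable (Spec_match_time t sche out) := by
  unfold Spec_match_time; infer_instance

-- ===== CLAIM (what is proved, stated in full; the proofs are below) =====
def Claim_equal_match_time : Prop := ∀ (t : Int) (sche : List (List Int)), Dom_match_time t sche → Pre_match_time t sche → Spec_match_time t sche (match_time t sche)

-- ===== LEMMAS AND PROOFS =====
theorem pyGet?_map' {α β : Type} (f : α → β) (xs : List α) (i : Int) :
    PySem.List.pyGet? (xs.map f) i = (PySem.List.pyGet? xs i).map f := by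
  simp only [PySem.List.pyGet?, List.length_map]
  cases PySem.List.pyIdx? xs.length i <;> simp

theorem gate_lookup (sche : List (List Int)) (i : Int) :
    PySem.List.pyGetD (sche.map (fun x => PySem.List.pyGetD x 0 0)) i 0 =
      PySem.List.pyGetD (PySem.List.pyGetD sche i []) 0 0 := by
  cases h : PySem.List.pyGet? sche i with
  | none => simp [PySem.List.pyGetD, pyGet?_map', h]; decide
  | some r => simp [PySem.List.pyGetD, pyGet?_map', h]

theorem loop_eq (t : Int) (sche : List (List Int)) (l r : Int) :
    mtLoopA t (sche.map (fun x => PySem.List.pyGetD x 0 0)) l r = mtGo t sche l r := by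
  fun_induction mtGo t sche l r with
  | case1 l r h => rw [mtLoopA]; simp only [if_pos h]
  | case2 l r h med hc ih =>
      rw [mtLoopA]; simp only [gate_lookup]
      rw [if_neg h, if_pos hc]; exact ih
  | case3 l r h med hc ih =>
      rw [mtLoopA]; simp only [gate_lookup]
      rw [if_neg h, if_neg hc]; exact ih

-- ===== VERDICT (by name: the statement is the Claim_ definition above) =====
theorem match_time_spec : Claim_equal_match_time := by
  intro t sche _hd hpre
  unfold Spec_match_time match_time match_time_alt
  by_cases hn : sche = []
  · simp [hn]
  · simp only [hn]
    have hpos : 0 < sche.length := List.length_pos_iff.mpr hn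
    have hlast : PySem.List.pyGetD sche (-1) [] = PySem.List.pyGetD sche ((sche.length : Int) - 1) [] := by
      simp only [PySem.List.pyGetD, PySem.List.pyGet?, PySem.List.pyIdx?]
      rw [if_neg (by omega), if_pos (by omega), if_pos (by omega), if_pos (by omega)]
      congr 3
      omega
    simp only [List.length_map, gate_lookup, hlast, loop_eq]
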